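-- pv_equiv track=rewrite | github.com/codingedward/flask-sieve | flask_sieve/rules_processor.py | validate_alpha_dash
-- ===== SOURCE A (Python) =====
-- def validate_alpha_dash(value, **_kwargs):
--     if not value:
--         return False
--     value = str(value)
--     acceptables = [' ', '-', '_']
--     for acceptable in acceptables:
--         value = value.replace(acceptable, '')
--     return value.isalpha()
-- ===== SOURCE B (Python) =====
-- def validate_alpha_dash(value, **_kwargs):
--     if not value:
--         return False
--     saw_letter = False
--     for ch in str(value):
--         if ch in (' ', '-', '_'):
--             continue
--         if not ch.isalpha():
--             return False
--         saw_letter = True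
--     return saw_letter
-- ===== Notes on version B (the rewrite author's own statement) =====
-- stated objective: alternative
-- what changed: Replaces A's three replace() passes plus isalpha() with a single character scan that skips separators, rejects non-letters early and tracks whether a letter was seen.
import Mathlib
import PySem

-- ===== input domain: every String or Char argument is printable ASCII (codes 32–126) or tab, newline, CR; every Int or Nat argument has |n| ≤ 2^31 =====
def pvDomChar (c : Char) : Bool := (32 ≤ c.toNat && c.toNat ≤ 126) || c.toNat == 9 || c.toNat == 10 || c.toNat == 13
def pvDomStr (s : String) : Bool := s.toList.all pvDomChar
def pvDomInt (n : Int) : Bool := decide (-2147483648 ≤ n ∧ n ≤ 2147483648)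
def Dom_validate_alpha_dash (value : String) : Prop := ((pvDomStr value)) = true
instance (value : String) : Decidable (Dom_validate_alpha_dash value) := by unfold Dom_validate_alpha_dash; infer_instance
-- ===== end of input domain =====

-- B replaces A's three replace() passes + isalpha() by a single scan with a saw-letter flag (alternative decomposition, same cost).


-- ===== PORT A =====
-- `if not value: return False`; then strip ' ', '-', '_' via successive replace; then isalpha()
def validate_alpha_dash (value : String) : Bool :=
  if value = "" then false
  else
    let acceptables : List String := [" ", "-", "_"]
    let value := acceptables.foldl (fun v a => PySem.Str.replace v a "") value
    PySem.Str.strIsalpha value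

-- ===== PORT B =====
-- single scan with a saw_letter flag, following Source B
def vadScan : List Char → Bool → Bool
  | [], saw => saw
  | c :: t, saw =>
    if c == ' ' || c == '-' || c == '_' then vadScan t saw
    else if PySem.Chars.isalpha c then vadScan t true
    else false

def validate_alpha_dash_alt (value : String) : Bool :=
  if value = "" then false
  else vadScan value.toList false

-- ===== PRECONDITION & SPEC =====
def Spec_validate_alpha_dash (value : String) (out : Bool) : Prop := out = validate_alpha_dash_alt value
instance (value : String) (out : Bool) : Decidable (Spec_validate_alpha_dash value out) := by unfold Spec_validate_alpha_dash; infer_instance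

-- ===== CLAIM (what is proved, stated in full; the proofs are below) =====
def Claim_equal_validate_alpha_dash : Prop := ∀ (value : String), Dom_validate_alpha_dash value → Spec_validate_alpha_dash value (validate_alpha_dash value)

-- ===== LEMMAS AND PROOFS =====

-- replacing a single character by the empty string is filtering it out
theorem replace_go_single (c : Char) : ∀ (fuel : Nat) (l acc : List Char), l.length ≤ fuel →
    PySem.Chars.replace.go [c] [] fuel l acc = acc.reverse ++ l.filter (fun d => d != c) := by
  intro fuel
  induction fuel with
  | zero =>
    intro l acc h
    have : l = [] := List.length_eq_zero_iff.mp (Nat.le_zero.mp h)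
    subst this
    simp [PySem.Chars.replace.go]
  | succ n ih =>
    intro l acc h
    cases l with
    | nil => simp [PySem.Chars.replace.go]
    | cons d t =>
      by_cases hdc : d = c
      · subst hdc
        have hpre : [d].isPrefixOf (d :: t) = true := by simp [List.isPrefixOf]
        simp only [PySem.Chars.replace.go, hpre]
        rw [ih _ _ (by simpa using Nat.succ_le_succ_iff.mp h)]
        simp
      · have hpre : [c].isPrefixOf (d :: t) = false := by
          simp [List.isPrefixOf]
          exact fun hh => (hdc hh.symm).elim
        simp only [PySem.Chars.replace.go]
        rw [if_neg (by simp [hpre])]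
        rw [ih _ _ (by simpa using Nat.succ_le_succ_iff.mp h)]
        simp [hdc]

theorem replace_single (c : Char) (s : List Char) :
    PySem.Chars.replace s [c] [] = s.filter (fun d => d != c) := by
  unfold PySem.Chars.replace
  rw [if_neg (by simp : ¬([c].isEmpty = true))]
  simpa using replace_go_single c s.length s [] (le_refl _)

-- characterization of the B-side scan
theorem vadScan_eq (cs : List Char) : ∀ (saw : Bool),
    vadScan cs saw =
      ((saw || !(cs.filter (fun d => !(d == ' ' || d == '-' || d == '_'))).isEmpty)
        && (cs.filter (fun d => !(d == ' ' || d == '-' || d == '_'))).all PySem.Chars.isalpha) := by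
  induction cs with
  | nil => intro saw; simp [vadScan]
  | cons c t ih =>
    intro saw
    by_cases hsep : (c == ' ' || c == '-' || c == '_') = true
    · rw [show vadScan (c :: t) saw = vadScan t saw from by simp [vadScan, hsep], ih]
      simp only [List.filter_cons, hsep, Bool.not_true, Bool.false_eq_true, reduceIte]
    · have hs : (c == ' ' || c == '-' || c == '_') = false := by simpa using hsep
      by_cases hal : PySem.Chars.isalpha c = true
      · rw [show vadScan (c :: t) saw = vadScan t true from by simp [vadScan, hs, hal], ih]
        simp only [List.filter_cons, hs, Bool.not_false, reduceIte, List.isEmpty_cons,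
          List.all_cons, hal, Bool.true_and, Bool.or_true, Bool.true_or]
      · have hal' : PySem.Chars.isalpha c = false := by simpa using hal
        rw [show vadScan (c :: t) saw = false from by simp [vadScan, hs, hal']]
        simp only [List.filter_cons, hs, Bool.not_false, reduceIte, List.all_cons, hal',
          Bool.false_and, Bool.and_false]

-- ===== VERDICT (by name: the statement is the Claim_ definition above) =====
theorem validate_alpha_dash_spec : Claim_equal_validate_alpha_dash := by
  intro value _
  unfold Spec_validate_alpha_dash validate_alpha_dash validate_alpha_dash_alt
  by_cases hv : value = ""
  · simp [hv]
  · simp only [if_neg hv]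
    rw [vadScan_eq]
    simp only [List.foldl, PySem.Str.strIsalpha_eq, PySem.Str.toList_replace]
    simp [replace_single, List.filter_filter, PySem.Chars.strIsalpha, bne,
      Bool.and_comm, Bool.and_assoc]
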